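-- pv_equiv track=rewrite | github.com/prednext/aspara | src/aspara/cli.py | parse_serve_components
-- ===== SOURCE A (Python) =====
-- def parse_serve_components(components: list[str]) -> tuple[bool, bool]:
--     """
--     Parse and validate component list for serve command
--
--     Args:
--         components: List of component names
--
--     Returns:
--         Tuple of (enable_dashboard, enable_tracker)
--
--     Raises:
--         ValueError: If invalid component name is provided
--     """
--     valid_components = {"dashboard", "tracker", "together"}
--
--     # Default: dashboard only
--     if not components:
--         return (True, False)
--
--     # Normalize and validate
--     normalized = [c.lower() for c in components]
--     for comp in normalized:
--         if comp not in valid_components: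
--             raise ValueError(f"Invalid component: {comp}. Valid options are: dashboard, tracker, together")
--
--     # Handle 'together' keyword
--     if "together" in normalized:
--         return (True, True)
--
--     # Handle explicit component list
--     enable_dashboard = "dashboard" in normalized
--     enable_tracker = "tracker" in normalized
--
--     # If both specified, enable both
--     if enable_dashboard and enable_tracker:
--         return (True, True)
--
--     return (enable_dashboard, enable_tracker)
-- ===== SOURCE B (Python) =====
-- def parse_serve_components(components: list[str]) -> tuple[bool, bool]:
--     has_together = has_dashboard = has_tracker = False
--     for c in components:
--         lc = c.lower()
--         if lc == "together":
--             has_together = True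
--         elif lc == "dashboard":
--             has_dashboard = True
--         elif lc == "tracker":
--             has_tracker = True
--         else:
--             raise ValueError(f"Invalid component: {lc}. Valid options are: dashboard, tracker, together")
--     if not components:
--         return (True, False)
--     if has_together:
--         return (True, True)
--     return (has_dashboard, has_tracker)
-- ===== Notes on version B (the rewrite author's own statement) =====
-- stated objective: simpler
-- what changed: One pass over components that lowercases, validates and sets three boolean flags as it goes, replacing A's normalize-comprehension plus validation loop plus three separate membership scans; the redundant both-specified branch disappears.
import Mathlib
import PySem

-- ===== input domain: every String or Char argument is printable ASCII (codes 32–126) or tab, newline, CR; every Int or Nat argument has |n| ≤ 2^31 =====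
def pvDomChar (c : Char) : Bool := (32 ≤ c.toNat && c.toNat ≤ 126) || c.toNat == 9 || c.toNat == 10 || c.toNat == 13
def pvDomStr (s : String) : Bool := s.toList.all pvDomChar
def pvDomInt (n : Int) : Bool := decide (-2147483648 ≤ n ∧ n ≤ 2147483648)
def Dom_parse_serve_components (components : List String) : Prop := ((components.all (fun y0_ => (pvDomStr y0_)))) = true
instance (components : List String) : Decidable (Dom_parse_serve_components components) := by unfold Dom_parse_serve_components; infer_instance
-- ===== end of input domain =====

-- ===== PORT A =====
-- B does one validating flag-setting pass instead of A's normalize + validate + three membership scans; simpler decomposition, same values.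
-- Both Pythons raise ValueError on an invalid component name; Pre_ excludes exactly those inputs.
def parse_serve_components (components : List String) : Bool × Bool :=
  if components = [] then (true, false)
  else
    let normalized := components.map PySem.Str.lower
    -- the validation loop raises ValueError on any invalid name; that path is outside Pre_
    if normalized.any (fun c => !(c == "dashboard" || c == "tracker" || c == "together")) then
      (true, false)  -- unreachable under Pre_ (Python raises here)
    else if normalized.contains "together" then (true, true)
    else
      let enable_dashboard := normalized.contains "dashboard"
      let enable_tracker := normalized.contains "tracker"
      if enable_dashboard && enable_tracker then (true, true)
      else (enable_dashboard, enable_tracker)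

-- ===== PORT B =====
-- the loop of B: carries (has_together, has_dashboard, has_tracker); none = ValueError (outside Pre_)
def pvGoB : List String → Bool → Bool → Bool → Option (Bool × Bool × Bool)
  | [], t, d, r => some (t, d, r)
  | c :: rest, t, d, r =>
    let lc := PySem.Str.lower c
    if lc == "together" then pvGoB rest true d r
    else if lc == "dashboard" then pvGoB rest t true r
    else if lc == "tracker" then pvGoB rest t d true
    else none

def parse_serve_components_alt (components : List String) : Bool × Bool :=
  match pvGoB components false false false with
  | none => (true, false)  -- unreachable under Pre_ (Python raises here)
  | some (t, d, r) =>
    if components = [] then (true, false)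
    else if t then (true, true)
    else (d, r)

-- ===== PRECONDITION & SPEC =====
-- Pre_ excludes exactly the inputs containing an invalid component name, on which both Pythons raise ValueError.
def Pre_parse_serve_components (components : List String) : Prop :=
  ∀ c ∈ components, PySem.Str.lower c = "dashboard" ∨ PySem.Str.lower c = "tracker" ∨ PySem.Str.lower c = "together"
instance (components : List String) : Decidable (Pre_parse_serve_components components) := by unfold Pre_parse_serve_components; infer_instance
def pvWitness_parse_serve_components : List String := ["Dashboard", "tracker"]
def Spec_parse_serve_components (components : List String) (out : Bool × Bool) : Prop := out = parse_serve_components_alt components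
instance (components : List String) (out : Bool × Bool) : Decidable (Spec_parse_serve_components components out) := by unfold Spec_parse_serve_components; infer_instance

-- ===== CLAIM (what is proved, stated in full; the proofs are below) =====
def Claim_equal_parse_serve_components : Prop := ∀ (components : List String), Dom_parse_serve_components components → Pre_parse_serve_components components → Spec_parse_serve_components components (parse_serve_components components)

-- ===== LEMMAS AND PROOFS =====

-- under validity, the single pass of B computes exactly the three membership tests of A
theorem pvGoB_eq (cs : List String) (t d r : Bool)
    (h : ∀ c ∈ cs, PySem.Str.lower c = "dashboard" ∨ PySem.Str.lower c = "tracker" ∨ PySem.Str.lower c = "together") :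
    pvGoB cs t d r = some (t || (cs.map PySem.Str.lower).contains "together",
                           d || (cs.map PySem.Str.lower).contains "dashboard",
                           r || (cs.map PySem.Str.lower).contains "tracker") := by
  induction cs generalizing t d r with
  | nil => simp [pvGoB]
  | cons c cs ih =>
    have hc := h c (List.mem_cons_self ..)
    have hrest : ∀ x ∈ cs, PySem.Str.lower x = "dashboard" ∨ PySem.Str.lower x = "tracker" ∨ PySem.Str.lower x = "together" :=
      fun x hx => h x (List.mem_cons_of_mem _ hx)
    rcases hc with hc | hc | hc <;>
      simp [pvGoB, hc, ih _ _ _ hrest]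

-- ===== VERDICT (by name: the statement is the Claim_ definition above) =====
theorem parse_serve_components_spec : Claim_equal_parse_serve_components := by
  intro components _ hpre
  unfold Spec_parse_serve_components parse_serve_components parse_serve_components_alt
  rw [pvGoB_eq components false false false hpre]
  rcases components with _ | ⟨c, cs⟩
  · simp
  · have hany : ((c :: cs).map PySem.Str.lower).any
        (fun x => !(x == "dashboard" || x == "tracker" || x == "together")) = false := by
      simp only [List.any_eq_false, List.mem_map]
      rintro x ⟨y, hy, rfl⟩
      rcases hpre y hy with h | h | h <;> simp [h]
    simp only [hany, Bool.false_eq_true, if_false, reduceCtorEq, Bool.false_or]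
    split_ifs with h1 h2 <;> simp_all
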